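-- pv_equiv track=rewrite | github.com/ExpressAPR/ExpressAPR | cli/patcher/expapr_patcher.py | fuse_succlist
-- ===== SOURCE A (Python) =====
-- def fuse_succlist(compile_list, run_list):
--     assert compile_list.count('?')==len(run_list), f'succlist length mismatch: c=[{compile_list}] r=[{run_list}]'
--     succlist = list(compile_list)
--
--     idx = 0
--     for c in run_list:
--         while succlist[idx]!='?':
--             idx += 1
--         succlist[idx] = c
--
--     return ''.join(succlist)
-- ===== SOURCE B (Python) =====
-- def fuse_succlist(compile_list, run_list):
--     assert compile_list.count('?')==len(run_list), f'succlist length mismatch: c=[{compile_list}] r=[{run_list}]'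
--     parts = compile_list.split('?')
--     return parts[0] + ''.join(r + p for r, p in zip(run_list, parts[1:]))
-- ===== Notes on version B (the rewrite author's own statement) =====
-- stated objective: alternative
-- what changed: B splits compile_list at '?' into segments and rebuilds the string by interleaving run_list's characters with the segments via zip and join, instead of A's loop over run_list mutating a character list with an inner pointer-advance scan for the next '?'.
-- intended difference: When run_list contains a '?' before a non-'?' character, A's scan pointer stays on the just-written '?' so the next run character overwrites the same slot (A returns the non-'?' run characters shifted forward with trailing slots left '?', e.g. 'a?' for ('??','?a')), while B puts each run character in its own slot ('?a'), which is the intended sequential replacement. — e.g. on fuse_succlist("??", "?a"): A returns "a?", B returns "?a"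
import Mathlib
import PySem

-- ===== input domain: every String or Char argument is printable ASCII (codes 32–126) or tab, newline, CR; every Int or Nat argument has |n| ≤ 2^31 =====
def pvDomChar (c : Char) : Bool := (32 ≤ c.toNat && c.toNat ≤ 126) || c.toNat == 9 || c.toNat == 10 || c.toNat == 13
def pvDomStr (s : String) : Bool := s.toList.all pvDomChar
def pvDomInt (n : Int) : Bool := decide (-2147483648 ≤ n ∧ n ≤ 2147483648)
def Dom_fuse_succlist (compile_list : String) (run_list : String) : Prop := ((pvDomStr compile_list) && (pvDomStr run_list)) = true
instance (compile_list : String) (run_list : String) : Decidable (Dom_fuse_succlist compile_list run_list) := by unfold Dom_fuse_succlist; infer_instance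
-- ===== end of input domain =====

-- B splits compile_list at '?' and interleaves the segments with run_list's characters
-- (split + zip + join; no per-character scan), instead of A's run_list loop mutating a
-- character list with an inner pointer-advance scan (alternative; return value only).

-- ===== PORT A =====
-- the `while succlist[idx] != '?': idx += 1` loop, with fuel (under Pre_ a '?' is always found)
def pvFindQ (sl : List Char) : Nat → Nat → Nat
  | idx, 0 => idx
  | idx, fuel+1 => if sl.getD idx '?' ≠ '?' then pvFindQ sl (idx+1) fuel else idx

-- the `for c in run_list` loop mutating succlist in place
def pvLoopA : List Char → List Char → Nat → List Char
  | [], sl, _ => sl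
  | c :: cs, sl, idx =>
      let j := pvFindQ sl idx (sl.length + 1)
      pvLoopA cs (sl.set j c) j

def fuse_succlist (compile_list : String) (run_list : String) : String :=
  String.ofList (pvLoopA run_list.toList compile_list.toList 0)

-- ===== PORT B =====
-- `compile_list.split('?')`: hand port of str.split, exact for a one-character separator
-- (split [] = [''], each '?' starts a new segment).
def pvSplitQ : List Char → List (List Char)
  | [] => [[]]
  | c :: cs =>
      match pvSplitQ cs with
      | s :: ss => if c = '?' then [] :: s :: ss else (c :: s) :: ss
      | [] => [[c]]   -- unreachable: pvSplitQ never returns []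

-- `''.join(r + p for r, p in zip(run_list, parts[1:]))`: zip truncates at the shorter list
def pvZipJoin : List Char → List (List Char) → List Char
  | r :: rs, p :: ps => r :: (p ++ pvZipJoin rs ps)
  | _, _ => []

-- `parts[0] + ''.join(...)`
def fuse_succlist_alt (compile_list : String) (run_list : String) : String :=
  match pvSplitQ compile_list.toList with
  | p :: ps => String.ofList (p ++ pvZipJoin run_list.toList ps)
  | [] => ""   -- unreachable: pvSplitQ never returns []

-- ===== PRECONDITION & SPEC =====
-- Pre_ excludes exactly the inputs on which A's assert fires (AssertionError):
-- the number of '?' in compile_list must equal the length of run_list.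
def Pre_fuse_succlist (compile_list : String) (run_list : String) : Prop :=
  compile_list.toList.count '?' = run_list.toList.length
instance (compile_list : String) (run_list : String) : Decidable (Pre_fuse_succlist compile_list run_list) := by unfold Pre_fuse_succlist; infer_instance

def pvWitness_fuse_succlist : String × String := ("a?b?c", "xy")

-- When run_list has a '?' before a non-'?' character, A's scan pointer stays on the
-- just-written '?' so the next run character overwrites the same slot (A returns the
-- non-'?' run characters shifted forward with trailing slots left '?'), while B puts
-- each run character in its own slot — the intended sequential replacement.
def D_fuse_succlist (compile_list : String) (run_list : String) : Prop :=
  ((run_list.toList.dropWhile (fun x => x ≠ '?')).any (fun x => x ≠ '?')) = true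
instance (compile_list : String) (run_list : String) : Decidable (D_fuse_succlist compile_list run_list) := by unfold D_fuse_succlist; infer_instance

def Spec_fuse_succlist (compile_list : String) (run_list : String) (out : String) : Prop := ¬ D_fuse_succlist compile_list run_list → out = fuse_succlist_alt compile_list run_list
instance (compile_list : String) (run_list : String) (out : String) : Decidable (Spec_fuse_succlist compile_list run_list out) := by unfold Spec_fuse_succlist; infer_instance

def pvDiffWitness_fuse_succlist : String × String := ("??", "?a")
def pvDiffWitnessOut_fuse_succlist : String × String := ("a?", "?a")

-- ===== CLAIM (what is proved, stated in full; the proofs are below) =====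
def Claim_unchanged_fuse_succlist : Prop := ∀ (compile_list : String) (run_list : String), Dom_fuse_succlist compile_list run_list → Pre_fuse_succlist compile_list run_list → Spec_fuse_succlist compile_list run_list (fuse_succlist compile_list run_list)
def Claim_changed_fuse_succlist : Prop := Dom_fuse_succlist (pvDiffWitness_fuse_succlist.1) (pvDiffWitness_fuse_succlist.2) ∧ Pre_fuse_succlist (pvDiffWitness_fuse_succlist.1) (pvDiffWitness_fuse_succlist.2) ∧ D_fuse_succlist (pvDiffWitness_fuse_succlist.1) (pvDiffWitness_fuse_succlist.2) ∧ fuse_succlist (pvDiffWitness_fuse_succlist.1) (pvDiffWitness_fuse_succlist.2) = pvDiffWitnessOut_fuse_succlist.1 ∧ fuse_succlist_alt (pvDiffWitness_fuse_succlist.1) (pvDiffWitness_fuse_succlist.2) = pvDiffWitnessOut_fuse_succlist.2 ∧ pvDiffWitnessOut_fuse_succlist.1 ≠ pvDiffWitnessOut_fuse_succlist.2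
def Claim_exact_fuse_succlist : Prop := ∀ (compile_list : String) (run_list : String), Dom_fuse_succlist compile_list run_list → Pre_fuse_succlist compile_list run_list → D_fuse_succlist compile_list run_list → fuse_succlist compile_list run_list ≠ fuse_succlist_alt compile_list run_list

-- ===== LEMMAS AND PROOFS =====

-- Reference single-pass fuser used only inside the proofs: both ports are reduced to it.
def pvFuseB : List Char → List Char → List Char
  | [], _ => []
  | ch :: rest, rs =>
      if ch = '?' then
        match rs with
        | r :: rs' => r :: pvFuseB rest rs'
        | [] => '?' :: pvFuseB rest []
      else ch :: pvFuseB rest rs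

-- A's run_list traversal, characterised: the non-'?' characters are kept in order and
-- the '?' characters are pushed to the back ('absorbed' by the stalled pointer).
def pvAbsorb : List Char → List Char
  | [] => []
  | c :: cs => if c = '?' then pvAbsorb cs ++ ['?'] else c :: pvAbsorb cs

theorem pvAbsorb_length (l : List Char) : (pvAbsorb l).length = l.length := by
  induction l with
  | nil => rfl
  | cons c cs ih => by_cases h : c = '?' <;> simp [pvAbsorb, h, ih]

theorem pvFuseB_nil_rs (l : List Char) : pvFuseB l [] = l := by
  induction l with
  | nil => rfl
  | cons ch rest ih => by_cases h : ch = '?' <;> simp [pvFuseB, h, ih]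

theorem pvFuseB_skip (pre t rs : List Char) (hpre : '?' ∉ pre) :
    pvFuseB (pre ++ t) rs = pre ++ pvFuseB t rs := by
  induction pre generalizing rs with
  | nil => simp
  | cons p ps ih =>
      simp only [List.mem_cons, not_or] at hpre
      have hp : ¬ p = '?' := fun e => hpre.1 e.symm
      simp [pvFuseB, hp, ih _ hpre.2]

theorem pvFuseB_pad (t rs : List Char) : pvFuseB t (rs ++ ['?']) = pvFuseB t rs := by
  induction t generalizing rs with
  | nil => rfl
  | cons ch rest ih =>
      by_cases h : ch = '?'
      · cases rs with
        | nil => simp [pvFuseB, h, pvFuseB_nil_rs]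
        | cons r rs' => simp [pvFuseB, h, ih]
      · simp [pvFuseB, h, ih]

theorem pvFirstQ (l : List Char) (h : '?' ∈ l) :
    ∃ pre suf, l = pre ++ '?' :: suf ∧ '?' ∉ pre := by
  induction l with
  | nil => cases h
  | cons a as ih =>
      by_cases ha : a = '?'
      · exact ⟨[], as, by simp [ha], by simp⟩
      · have h' : '?' ∈ as := by
          rcases List.mem_cons.1 h with h' | h'
          · exact absurd h'.symm ha
          · exact h'
        rcases ih h' with ⟨pre, suf, heq, hpre⟩
        refine ⟨a :: pre, suf, by simp [heq], ?_⟩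
        simp only [List.mem_cons, not_or]
        exact ⟨fun e => ha e.symm, hpre⟩

theorem pvGetD_of_drop (sl : List Char) (idx : Nat) (d : Char) (ds : List Char)
    (h : sl.drop idx = d :: ds) : sl.getD idx '?' = d := by
  have h0 : (sl.drop idx)[0]? = some d := by simp [h]
  rw [List.getElem?_drop, Nat.add_zero] at h0
  simp [List.getD, h0]

theorem pvFindQ_spec (sl : List Char) (pre suf : List Char) (idx fuel : Nat)
    (h : sl.drop idx = pre ++ '?' :: suf) (hpre : '?' ∉ pre) (hfuel : pre.length < fuel) :
    pvFindQ sl idx fuel = idx + pre.length := by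
  induction pre generalizing idx fuel with
  | nil =>
      cases fuel with
      | zero => omega
      | succ f =>
          have hg := pvGetD_of_drop sl idx '?' suf (by simpa using h)
          simp only [pvFindQ]
          rw [if_neg (not_not_intro hg)]
          simp
  | cons p ps ih =>
      simp only [List.mem_cons, not_or] at hpre
      cases fuel with
      | zero => omega
      | succ f =>
          have hg := pvGetD_of_drop sl idx p (ps ++ '?' :: suf) (by simpa using h)
          have hdrop : sl.drop (idx + 1) = ps ++ '?' :: suf := by
            have h1 : sl.drop (idx + 1) = (sl.drop idx).drop 1 := by
              rw [List.drop_drop]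
            rw [h1, h]; rfl
          have hrec := ih (idx + 1) f hdrop hpre.2 (by simp at hfuel ⊢; omega)
          simp only [pvFindQ, hg]
          rw [if_pos (fun e => hpre.1 e.symm), hrec]
          simp; omega

theorem pvMain (rs sl : List Char) (idx : Nat)
    (h : rs.length ≤ (sl.drop idx).count '?') :
    pvLoopA rs sl idx = sl.take idx ++ pvFuseB (sl.drop idx) (pvAbsorb rs) := by
  induction rs generalizing sl idx with
  | nil => simp [pvLoopA, pvAbsorb, pvFuseB_nil_rs]
  | cons c cs ih =>
      have hmem : '?' ∈ sl.drop idx := by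
        have : 0 < (sl.drop idx).count '?' := by simp at h; omega
        exact List.count_pos_iff.1 this
      rcases pvFirstQ _ hmem with ⟨pre, suf, heq, hpre⟩
      have hdlen := congrArg List.length heq
      simp [List.length_drop] at hdlen
      have hfind : pvFindQ sl idx (sl.length + 1) = idx + pre.length :=
        pvFindQ_spec sl pre suf idx (sl.length + 1) heq hpre (by omega)
      have hsl : sl = sl.take idx ++ pre ++ '?' :: suf := by
        conv_lhs => rw [← List.take_append_drop idx sl, heq]
        simp
      have htk : (sl.take idx).length = idx := by
        simp [List.length_take]; omega
      have hj : idx + pre.length = (sl.take idx ++ pre).length := by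
        rw [List.length_append, htk]
      have hcount : (c :: cs).length ≤ (pre ++ '?' :: suf).count '?' := heq ▸ h
      have hcsuf : cs.length ≤ suf.count '?' := by
        simp [List.count_append, List.count_eq_zero_of_not_mem hpre] at hcount
        simpa using hcount
      by_cases hc : c = '?'
      · -- written char is '?': the set is a no-op and the pointer stays on slot j
        have hset : sl.set (idx + pre.length) c = sl := by
          rw [hc, hsl, hj]
          simp
        have hdropj : sl.drop (idx + pre.length) = '?' :: suf := by
          conv_lhs => rw [hsl, hj]
          exact List.drop_left
        have hcnt2 : cs.length ≤ (sl.drop (idx + pre.length)).count '?' := by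
          rw [hdropj]; simp; omega
        have htakej : sl.take (idx + pre.length) = sl.take idx ++ pre := by
          conv_lhs => rw [hsl, hj]
          exact List.take_left
        calc pvLoopA (c :: cs) sl idx
            = pvLoopA cs sl (idx + pre.length) := by simp [pvLoopA, hfind, hset]
          _ = sl.take (idx + pre.length) ++ pvFuseB (sl.drop (idx + pre.length)) (pvAbsorb cs) :=
              ih _ _ hcnt2
          _ = sl.take idx ++ (pre ++ pvFuseB ('?' :: suf) (pvAbsorb cs)) := by
              rw [htakej, hdropj]; simp
          _ = sl.take idx ++ pvFuseB (sl.drop idx) (pvAbsorb (c :: cs)) := by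
              rw [heq, pvFuseB_skip _ _ _ hpre]
              simp [pvAbsorb, hc, pvFuseB_pad]
      · -- written char is not '?': slot j is filled for good
        have hset : sl.set (idx + pre.length) c = sl.take idx ++ pre ++ c :: suf := by
          conv_lhs => rw [hsl, hj]
          simp
        have hdropset : (sl.set (idx + pre.length) c).drop (idx + pre.length) = c :: suf := by
          rw [hset, hj]
          exact List.drop_left
        have htakeset : (sl.set (idx + pre.length) c).take (idx + pre.length) = sl.take idx ++ pre := by
          rw [hset, hj]
          exact List.take_left
        have hcnt2 : cs.length ≤ ((sl.set (idx + pre.length) c).drop (idx + pre.length)).count '?' := by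
          rw [hdropset]; simp [List.count_cons]; omega
        calc pvLoopA (c :: cs) sl idx
            = pvLoopA cs (sl.set (idx + pre.length) c) (idx + pre.length) := by
              simp [pvLoopA, hfind]
          _ = (sl.set (idx + pre.length) c).take (idx + pre.length)
                ++ pvFuseB ((sl.set (idx + pre.length) c).drop (idx + pre.length)) (pvAbsorb cs) :=
              ih _ _ hcnt2
          _ = sl.take idx ++ (pre ++ (c :: pvFuseB suf (pvAbsorb cs))) := by
              rw [htakeset, hdropset]; simp [pvFuseB, hc]
          _ = sl.take idx ++ pvFuseB (sl.drop idx) (pvAbsorb (c :: cs)) := by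
              rw [heq, pvFuseB_skip _ _ _ hpre]
              simp [pvAbsorb, pvFuseB, hc]

theorem pvAbsorb_all (l : List Char) (h : ∀ x ∈ l, x = '?') : pvAbsorb l = l := by
  induction l with
  | nil => rfl
  | cons c cs ih =>
      have hc : c = '?' := h c (by simp)
      have hcs : ∀ x ∈ cs, x = '?' := fun x hx => h x (by simp [hx])
      have hrep : cs = List.replicate cs.length '?' := List.eq_replicate_of_mem hcs
      rw [pvAbsorb, if_pos hc, ih hcs, hc]
      conv_lhs => rw [hrep]
      conv_rhs => rw [hrep]
      simp [← List.replicate_succ, List.replicate_succ']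

theorem pvAbsorb_eq_self (l : List Char)
    (h : ¬ ((l.dropWhile (fun x => x ≠ '?')).any (fun x => x ≠ '?')) = true) :
    pvAbsorb l = l := by
  induction l with
  | nil => rfl
  | cons c cs ih =>
      by_cases hc : c = '?'
      · have hall : ∀ x ∈ c :: cs, x = '?' := by
          have hd : (c :: cs).dropWhile (fun x => x ≠ '?') = c :: cs := by
            rw [List.dropWhile_cons]
            simp [hc]
          rw [hd] at h
          simp only [List.any_eq_true, not_exists, not_and] at h
          intro x hx
          by_contra hne
          exact (h x hx) (by simpa using hne)
        exact pvAbsorb_all _ hall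
      · have hd : (c :: cs).dropWhile (fun x => x ≠ '?') = cs.dropWhile (fun x => x ≠ '?') := by
          rw [List.dropWhile_cons]
          simp [hc]
        rw [hd] at h
        simp [pvAbsorb, hc, ih h]

theorem pvAbsorb_head (l : List Char) (h : ∃ x ∈ l, x ≠ '?') :
    (pvAbsorb l).head? ≠ some '?' := by
  induction l with
  | nil => simp at h
  | cons c cs ih =>
      by_cases hc : c = '?'
      · have h' : ∃ x ∈ cs, x ≠ '?' := by
          rcases h with ⟨x, hx, hne⟩
          rcases List.mem_cons.1 hx with rfl | hx'
          · exact absurd hc hne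
          · exact ⟨x, hx', hne⟩
        have hne : pvAbsorb cs ≠ [] := by
          rcases h' with ⟨x, hx, _⟩
          intro e
          have hl := pvAbsorb_length cs
          rw [e] at hl
          have hnil : cs = [] := List.length_eq_zero_iff.1 hl.symm
          simp [hnil] at hx
        rw [pvAbsorb, if_pos hc, List.head?_append_of_ne_nil _ hne]
        exact ih h'
      · rw [pvAbsorb, if_neg hc]
        simp [hc]

theorem pvAbsorb_ne_of_D (l : List Char)
    (h : ((l.dropWhile (fun x => x ≠ '?')).any (fun x => x ≠ '?')) = true) :
    pvAbsorb l ≠ l := by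
  induction l with
  | nil => simp at h
  | cons c cs ih =>
      by_cases hc : c = '?'
      · have hd : (c :: cs).dropWhile (fun x => x ≠ '?') = c :: cs := by
          rw [List.dropWhile_cons]; simp [hc]
        rw [hd] at h
        have hex : ∃ x ∈ cs, x ≠ '?' := by
          simp only [List.any_eq_true] at h
          rcases h with ⟨x, hx, hne⟩
          rcases List.mem_cons.1 hx with rfl | hx'
          · simp [hc] at hne
          · exact ⟨x, hx', by simpa using hne⟩
        intro heq
        have hh := pvAbsorb_head (c :: cs) (by
          rcases hex with ⟨x, hx, hne⟩; exact ⟨x, by simp [hx], hne⟩)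
        rw [heq] at hh
        simp [hc] at hh
      · have hd : (c :: cs).dropWhile (fun x => x ≠ '?') = cs.dropWhile (fun x => x ≠ '?') := by
          rw [List.dropWhile_cons]; simp [hc]
        rw [hd] at h
        have := ih h
        simp [pvAbsorb, hc]
        exact this

theorem pvFuseB_inj (cl rs1 rs2 : List Char)
    (hlen : rs1.length = rs2.length) (hle : rs1.length ≤ cl.count '?')
    (heq : pvFuseB cl rs1 = pvFuseB cl rs2) : rs1 = rs2 := by
  induction cl generalizing rs1 rs2 with
  | nil =>
      have h1 : rs1.length = 0 := by simpa using hle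
      have h2 : rs2.length = 0 := by omega
      rw [List.length_eq_zero_iff.1 h1, List.length_eq_zero_iff.1 h2]
  | cons ch rest ih =>
      by_cases hc : ch = '?'
      · cases rs1 with
        | nil =>
            cases rs2 with
            | nil => rfl
            | cons b t2 => simp at hlen
        | cons a t1 =>
            cases rs2 with
            | nil => simp at hlen
            | cons b t2 =>
                simp only [pvFuseB, if_pos hc] at heq
                have hab : a = b := by
                  have := congrArg List.head? heq
                  simpa using this
                have htail : pvFuseB rest t1 = pvFuseB rest t2 := by
                  have := congrArg List.tail heq
                  simpa using this
                have hl : t1.length = t2.length := by simpa using hlen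
                have hle' : t1.length ≤ rest.count '?' := by
                  simp [hc] at hle
                  omega
                rw [hab, ih _ _ hl hle' htail]
      · simp only [pvFuseB, if_neg hc] at heq
        have htail : pvFuseB rest rs1 = pvFuseB rest rs2 := by
          have := congrArg List.tail heq
          simpa using this
        have hle' : rs1.length ≤ rest.count '?' := by
          simpa [List.count_cons, hc] using hle
        exact ih _ _ hlen hle' htail

theorem pvA_char (compile_list run_list : String)
    (hpre : compile_list.toList.count '?' = run_list.toList.length) :
    fuse_succlist compile_list run_list
      = String.ofList (pvFuseB compile_list.toList (pvAbsorb run_list.toList)) := by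
  unfold fuse_succlist
  rw [pvMain _ _ 0 (by simp [hpre.symm])]
  simp

-- B characterised: split + zip + join is the single-pass fuser when the counts match.
theorem pvSplitQ_ne_nil (l : List Char) : pvSplitQ l ≠ [] := by
  cases l with
  | nil => simp [pvSplitQ]
  | cons c cs =>
      simp only [pvSplitQ]
      rcases h : pvSplitQ cs with _ | ⟨s, ss⟩
      · simp
      · by_cases hc : c = '?' <;> simp [hc]

theorem pvAlt_eq (cl rs : List Char) (h : rs.length = cl.count '?') :
    (match pvSplitQ cl with
     | p :: ps => p ++ pvZipJoin rs ps
     | [] => []) = pvFuseB cl rs := by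
  induction cl generalizing rs with
  | nil =>
      have h0 : rs = [] := List.length_eq_zero_iff.1 (by simpa using h)
      simp [pvSplitQ, pvZipJoin, pvFuseB, h0]
  | cons c cs ih =>
      rcases hs : pvSplitQ cs with _ | ⟨s, ss⟩
      · exact absurd hs (pvSplitQ_ne_nil cs)
      · by_cases hc : c = '?'
        · have hlen : rs.length = cs.count '?' + 1 := by
            simpa [List.count_cons, hc] using h
          cases rs with
          | nil => simp at hlen
          | cons a t =>
              have ht : t.length = cs.count '?' := by simpa using hlen
              have := ih t ht
              rw [hs] at this
              simp only [pvSplitQ, hs, if_pos hc, pvZipJoin, pvFuseB, if_pos hc]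
              simpa using this
        · have hlen : rs.length = cs.count '?' := by
            simpa [List.count_cons, hc] using h
          have := ih rs hlen
          rw [hs] at this
          simp only [pvSplitQ, hs, if_neg hc, pvFuseB, if_neg hc]
          cases rs with
          | nil =>
              simp only [pvZipJoin, List.append_nil] at this ⊢
              simp [this]
          | cons a t =>
              simp [this]

theorem pvB_char (compile_list run_list : String)
    (hpre : compile_list.toList.count '?' = run_list.toList.length) :
    fuse_succlist_alt compile_list run_list
      = String.ofList (pvFuseB compile_list.toList run_list.toList) := by
  unfold fuse_succlist_alt
  rcases hs : pvSplitQ compile_list.toList with _ | ⟨p, ps⟩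
  · exact absurd hs (pvSplitQ_ne_nil _)
  · have := pvAlt_eq compile_list.toList run_list.toList hpre.symm
    rw [hs] at this
    simp only at this
    simpa using congrArg String.ofList this

-- ===== VERDICT (by name: the statement is the Claim_ definition above) =====
theorem fuse_succlist_spec : Claim_unchanged_fuse_succlist := by
  intro c r _ hpre hnd
  rw [pvA_char c r hpre, pvB_char c r hpre]
  rw [pvAbsorb_eq_self _ hnd]

theorem fuse_succlist_changed : Claim_changed_fuse_succlist := by
  unfold Claim_changed_fuse_succlist; decide

theorem fuse_succlist_tight : Claim_exact_fuse_succlist := by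
  intro c r _ hpre hd heq
  rw [pvA_char c r hpre, pvB_char c r hpre] at heq
  have hlists : pvFuseB c.toList (pvAbsorb r.toList) = pvFuseB c.toList r.toList := by
    have := congrArg String.toList heq
    simpa using this
  have := pvFuseB_inj c.toList _ _ (by simp [pvAbsorb_length]) (by rw [pvAbsorb_length, ← hpre]) hlists
  exact pvAbsorb_ne_of_D r.toList hd this
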